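-- pv_equiv track=rewrite | github.com/soxballs/gcpwn | gcpwn/modules/artifactregistry/enumeration/enum_artifactregistry.py | _parse_download_scopes
-- ===== SOURCE A (Python) =====
-- from typing import Any
--
-- DOWNLOAD_SCOPE_ALIASES = {
--     "all": "all",
--     "apt": "apt_artifacts",
--     "apt_artifact": "apt_artifacts",
--     "apt_artifacts": "apt_artifacts",
--     "docker": "docker_images",
--     "docker_image": "docker_images",
--     "docker_images": "docker_images",
--     "list_docker_images": "docker_images",
--     "list_packages": "packages",
--     "maven": "maven_artifacts",
--     "maven_artifact": "maven_artifacts",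
--     "maven_artifacts": "maven_artifacts",
--     "npm": "npm_packages",
--     "npm_package": "npm_packages",
--     "npm_packages": "npm_packages",
--     "package": "packages",
--     "packages": "packages",
--     "python": "python_packages",
--     "python_package": "python_packages",
--     "python_packages": "python_packages",
--     "yum": "yum_artifacts",
--     "yum_artifact": "yum_artifacts",
--     "yum_artifacts": "yum_artifacts",
-- }
--
-- ALL_DOWNLOAD_SCOPES = [
--     "packages",
--     "python_packages",
--     "npm_packages",
--     "maven_artifacts",
--     "apt_artifacts",
--     "yum_artifacts",
--     "docker_images",
-- ]
--
-- def _normalize_token(value: Any) -> str: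
--     return str(value or "").strip().lower().replace("-", "_").replace(" ", "_")
--
-- def _parse_download_scopes(raw_value: str | None) -> list[str]:
--     normalized = str(raw_value or "").strip()
--     if not normalized:
--         return []
--
--     requested: list[str] = []
--     seen: set[str] = set()
--     for raw_token in [part for part in normalized.split(",") if part.strip()]:
--         mapped = DOWNLOAD_SCOPE_ALIASES.get(_normalize_token(raw_token))
--         if not mapped:
--             raise ValueError(
--                 "Invalid --download scope. Use a comma-separated list from: "
--                 "packages, python_packages, npm_packages, maven_artifacts, apt_artifacts, yum_artifacts, docker_images."
--             )
--         expanded = ALL_DOWNLOAD_SCOPES if mapped == "all" else [mapped]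
--         for scope in expanded:
--             if scope in seen:
--                 continue
--             seen.add(scope)
--             requested.append(scope)
--     return requested
-- ===== SOURCE B (Python) =====
-- DOWNLOAD_SCOPE_ALIASES = {
--     "all": "all",
--     "apt": "apt_artifacts",
--     "apt_artifact": "apt_artifacts",
--     "apt_artifacts": "apt_artifacts",
--     "docker": "docker_images",
--     "docker_image": "docker_images",
--     "docker_images": "docker_images",
--     "list_docker_images": "docker_images",
--     "list_packages": "packages",
--     "maven": "maven_artifacts",
--     "maven_artifact": "maven_artifacts",
--     "maven_artifacts": "maven_artifacts",
--     "npm": "npm_packages",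
--     "npm_package": "npm_packages",
--     "npm_packages": "npm_packages",
--     "package": "packages",
--     "packages": "packages",
--     "python": "python_packages",
--     "python_package": "python_packages",
--     "python_packages": "python_packages",
--     "yum": "yum_artifacts",
--     "yum_artifact": "yum_artifacts",
--     "yum_artifacts": "yum_artifacts",
-- }
--
-- ALL_DOWNLOAD_SCOPES = [
--     "packages",
--     "python_packages",
--     "npm_packages",
--     "maven_artifacts",
--     "apt_artifacts",
--     "yum_artifacts",
--     "docker_images",
-- ]
--
--
-- def _normalize_token(value):
--     return str(value or "").strip().lower().replace("-", "_").replace(" ", "_")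
--
--
-- def _expand_parts(parts):
--     # Recursively expand the raw comma-split parts into one flat scope list
--     # (duplicates kept), skipping blank parts; invalid tokens raise.
--     if not parts:
--         return []
--     head, rest = parts[0], parts[1:]
--     if not head.strip():
--         return _expand_parts(rest)
--     mapped = DOWNLOAD_SCOPE_ALIASES.get(_normalize_token(head))
--     if not mapped:
--         raise ValueError(
--             "Invalid --download scope. Use a comma-separated list from: "
--             "packages, python_packages, npm_packages, maven_artifacts, apt_artifacts, yum_artifacts, docker_images."
--         )
--     return (ALL_DOWNLOAD_SCOPES if mapped == "all" else [mapped]) + _expand_parts(rest)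
--
--
-- def _parse_download_scopes(raw_value):
--     normalized = str(raw_value or "").strip()
--     if not normalized:
--         return []
--     expanded = _expand_parts(normalized.split(","))
--     # distinct scopes, ordered by the position of their first occurrence
--     return sorted(set(expanded), key=expanded.index)
-- ===== Notes on version B (the rewrite author's own statement) =====
-- stated objective: alternative
-- what changed: A's single interleaved loop with a manually maintained seen-set/append dedup is replaced by a recursive expansion of the raw comma-split parts into one flat duplicated list, followed by dedup-by-sorting: sorted(set(expanded), key=expanded.index) recovers the first-occurrence order by sorting the distinct scopes on their first index.
import Mathlib
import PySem

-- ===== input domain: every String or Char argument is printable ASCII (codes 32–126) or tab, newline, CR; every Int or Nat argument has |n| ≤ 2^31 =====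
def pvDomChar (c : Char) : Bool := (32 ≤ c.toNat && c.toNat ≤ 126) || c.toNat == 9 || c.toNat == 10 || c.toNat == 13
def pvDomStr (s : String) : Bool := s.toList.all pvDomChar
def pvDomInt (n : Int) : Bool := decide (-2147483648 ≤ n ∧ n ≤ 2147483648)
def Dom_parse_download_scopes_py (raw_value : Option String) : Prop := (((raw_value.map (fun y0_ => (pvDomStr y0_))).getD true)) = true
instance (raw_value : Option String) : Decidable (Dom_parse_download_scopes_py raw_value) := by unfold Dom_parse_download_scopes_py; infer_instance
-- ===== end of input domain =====

-- B replaces A's interleaved loop (alias lookup, validation and a manual seen-set/append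
-- dedup in one pass) by a recursive expansion into one flat duplicated list followed by
-- dedup-by-sorting: sorted(set(expanded), key=expanded.index).

-- shared same-module constants and the _normalize_token helper
def pvAliases : PySem.Dict String String := PySem.Dict.ofList
  [("all", "all"), ("apt", "apt_artifacts"), ("apt_artifact", "apt_artifacts"),
   ("apt_artifacts", "apt_artifacts"), ("docker", "docker_images"),
   ("docker_image", "docker_images"), ("docker_images", "docker_images"),
   ("list_docker_images", "docker_images"), ("list_packages", "packages"),
   ("maven", "maven_artifacts"), ("maven_artifact", "maven_artifacts"),
   ("maven_artifacts", "maven_artifacts"), ("npm", "npm_packages"),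
   ("npm_package", "npm_packages"), ("npm_packages", "npm_packages"),
   ("package", "packages"), ("packages", "packages"),
   ("python", "python_packages"), ("python_package", "python_packages"),
   ("python_packages", "python_packages"), ("yum", "yum_artifacts"),
   ("yum_artifact", "yum_artifacts"), ("yum_artifacts", "yum_artifacts")]

def pvAllScopes : List String :=
  ["packages", "python_packages", "npm_packages", "maven_artifacts",
   "apt_artifacts", "yum_artifacts", "docker_images"]

-- _normalize_token (on a str token t, 't or ""' is t itself when nonempty and "" when empty: the same string)
def pvNormalize (t : String) : String :=
  PySem.Str.replace (PySem.Str.replace (PySem.Str.lower (PySem.Str.strip t)) "-" "_") " " "_"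

-- ===== PORT A =====
-- '[part for part in normalized.split(",") if part.strip()]'
def pvTokens (normalized : String) : List String :=
  ((PySem.Str.split? normalized ",").getD []).filter (fun p => PySem.Str.strip p ≠ "")

-- A's loop: state (seen, requested); stops early where Python raises ValueError (excluded by Pre_)
def pvLoopA (aliases : PySem.Dict String String) :
    List String → PySem.Set String × List String → PySem.Set String × List String
  | [], acc => acc
  | t :: ts, acc =>
    match aliases.get? (pvNormalize t) with
    | none => acc   -- Python: raise ValueError("Invalid --download scope. …")
    | some m =>
      let expanded := if m = "all" then pvAllScopes else [m]
      pvLoopA aliases ts (expanded.foldl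
        (fun (acc : PySem.Set String × List String) s =>
          if acc.1.contains s then acc else (PySem.Set.add acc.1 s, acc.2 ++ [s])) acc)

def parse_download_scopes_py (raw_value : Option String) : List String :=
  let normalized := PySem.Str.strip (raw_value.getD "")
  if normalized = "" then []
  else (pvLoopA pvAliases (pvTokens normalized) (PySem.Set.empty, [])).2

-- ===== PORT B =====
-- _expand_parts: recursion on the raw comma-split parts; none = Python's raise ValueError
def pvExpandParts (aliases : PySem.Dict String String) : List String → Option (List String)
  | [] => some []
  | p :: ps =>
    if PySem.Str.strip p = "" then pvExpandParts aliases ps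
    else
      match aliases.get? (pvNormalize p) with
      | none => none   -- Python: raise ValueError("Invalid --download scope. …")
      | some m =>
        (pvExpandParts aliases ps).map (fun rest => (if m = "all" then pvAllScopes else [m]) ++ rest)

-- 'sorted(set(expanded), key=expanded.index)' on the result of _expand_parts; every set
-- element is in expanded, so '.index' never raises and '(index? …).getD 0' is exact
def pvFinish : Option (List String) → List String
  | none => []   -- Python: the ValueError from _expand_parts propagates
  | some expanded =>
      PySem.List.sorted (PySem.Set.ofList expanded)
        (fun s => (PySem.List.index? expanded s).getD 0) false

def parse_download_scopes_py_alt (raw_value : Option String) : List String :=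
  let normalized := PySem.Str.strip (raw_value.getD "")
  if normalized = "" then []
  else pvFinish (pvExpandParts pvAliases ((PySem.Str.split? normalized ",").getD []))

-- ===== PRECONDITION & SPEC =====
-- Pre_ excludes exactly the inputs with a token that maps to no alias, where A raises ValueError.
def Pre_parse_download_scopes_py (raw_value : Option String) : Prop :=
  ∀ t ∈ pvTokens (PySem.Str.strip (raw_value.getD "")),
    (pvAliases.get? (pvNormalize t)).isSome
instance (raw_value : Option String) : Decidable (Pre_parse_download_scopes_py raw_value) := by
  unfold Pre_parse_download_scopes_py; infer_instance

def pvWitness_parse_download_scopes_py : Option String := some "all, Docker-Image,python"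

def Spec_parse_download_scopes_py (raw_value : Option String) (out : List String) : Prop :=
  out = parse_download_scopes_py_alt raw_value
instance (raw_value : Option String) (out : List String) : Decidable (Spec_parse_download_scopes_py raw_value out) := by
  unfold Spec_parse_download_scopes_py; infer_instance

-- ===== CLAIM =====
def Claim_equal_parse_download_scopes_py : Prop := ∀ (raw_value : Option String), Dom_parse_download_scopes_py raw_value → Pre_parse_download_scopes_py raw_value → Spec_parse_download_scopes_py raw_value (parse_download_scopes_py raw_value)

-- ===== LEMMAS AND PROOFS =====

-- A's inner dedup fold, started with seen = requested, is Set.update on both components.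
theorem pvFoldDedup_eq_update (E : List String) (r : PySem.Set String) :
    E.foldl (fun (acc : PySem.Set String × List String) s =>
        if acc.1.contains s then acc else (PySem.Set.add acc.1 s, acc.2 ++ [s])) (r, r)
      = (PySem.Set.update r E, PySem.Set.update r E) := by
  induction E generalizing r with
  | nil => simp [PySem.Set.update]
  | cons x E ih =>
    have hstep : (if (r, r).1.contains x = true then (r, r)
        else ((r, r).1.add x, (r, r).2 ++ [x])) = (PySem.Set.add r x, PySem.Set.add r x) := by
      by_cases h : x ∈ r <;> simp [PySem.Set.add, h]
    rw [List.foldl_cons, hstep, ih, PySem.Set.update_cons]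

def pvExpandTok (d : PySem.Dict String String) (t : String) : List String :=
  match d.get? (pvNormalize t) with
  | some m => if m = "all" then pvAllScopes else [m]
  | none => []

-- A's token loop, on valid tokens, accumulates Set.update of the flat expansion.
theorem pvLoopA_valid (d : PySem.Dict String String) (ts : List String) (r : PySem.Set String)
    (h : ∀ t ∈ ts, (d.get? (pvNormalize t)).isSome) :
    pvLoopA d ts (r, r)
      = (PySem.Set.update r (ts.flatMap (pvExpandTok d)),
         PySem.Set.update r (ts.flatMap (pvExpandTok d))) := by
  induction ts generalizing r with
  | nil => simp [pvLoopA, PySem.Set.update]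
  | cons t ts ih =>
    obtain ⟨m, hm⟩ := Option.isSome_iff_exists.mp (h t (List.mem_cons_self ..))
    have hrec := ih (PySem.Set.update r (pvExpandTok d t))
      (fun t' ht' => h t' (List.mem_cons_of_mem _ ht'))
    simp only [pvLoopA, hm]
    rw [show (if m = "all" then pvAllScopes else [m]) = pvExpandTok d t from
          (by unfold pvExpandTok; rw [hm]),
        pvFoldDedup_eq_update, hrec, List.flatMap_cons, PySem.Set.update_append]

-- B's recursion, on valid parts, is the flat expansion of the filtered tokens.
theorem pvExpandParts_valid (d : PySem.Dict String String) (ps : List String)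
    (h : ∀ t ∈ ps.filter (fun p => PySem.Str.strip p ≠ ""),
        (d.get? (pvNormalize t)).isSome) :
    pvExpandParts d ps
      = some ((ps.filter (fun p => PySem.Str.strip p ≠ "")).flatMap (pvExpandTok d)) := by
  induction ps with
  | nil => rfl
  | cons p ps ih =>
    have hrest : ∀ t ∈ ps.filter (fun p => PySem.Str.strip p ≠ ""),
        (d.get? (pvNormalize t)).isSome := by
      intro t ht
      refine h t ?_
      rw [List.filter_cons]
      split
      · exact List.mem_cons_of_mem _ ht
      · exact ht
    by_cases hb : PySem.Str.strip p = ""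
    · rw [show pvExpandParts d (p :: ps) = pvExpandParts d ps from by
          simp only [pvExpandParts, if_pos hb],
        ih hrest, List.filter_cons_of_neg (by simp [hb])]
    · obtain ⟨m, hm⟩ := Option.isSome_iff_exists.mp
        (h p (by rw [List.filter_cons_of_pos (by simp [hb])]; exact List.mem_cons_self ..))
      rw [show pvExpandParts d (p :: ps)
            = (pvExpandParts d ps).map (fun rest => (if m = "all" then pvAllScopes else [m]) ++ rest)
          from by simp only [pvExpandParts, if_neg hb, hm],
        ih hrest, List.filter_cons_of_pos (by simp [hb]), List.flatMap_cons,
        show pvExpandTok d p = (if m = "all" then pvAllScopes else [m]) from by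
          unfold pvExpandTok; rw [hm]]
      rfl

-- foldl-add invariant: the set built from a processed prefix p has exactly p's elements,
-- and they are Pairwise-ordered by first-occurrence index in the FULL list xs
theorem pvFoldAdd_invariant {α : Type} [DecidableEq α] (xs : List α) :
    ∀ (ys p s : List α), xs = p ++ ys → (∀ a, a ∈ s ↔ a ∈ p) →
      s.Pairwise (fun a b => xs.idxOf a < xs.idxOf b) →
      (ys.foldl PySem.Set.add s).Pairwise (fun a b => xs.idxOf a < xs.idxOf b) := by
  intro ys
  induction ys with
  | nil => intro p s _ _ hp; simpa using hp
  | cons y ys ih =>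
    intro p s hxs hmem hp
    have hxs' : xs = (p ++ [y]) ++ ys := by simp [hxs]
    have hmem' : ∀ a, a ∈ PySem.Set.add s y ↔ a ∈ p ++ [y] := by
      intro a
      by_cases hy : y ∈ s
      · have he : PySem.Set.add s y = s := by simp [PySem.Set.add, hy]
        have hyp : y ∈ p := (hmem y).mp hy
        rw [he]
        simp only [List.mem_append, List.mem_singleton, hmem a]
        exact ⟨Or.inl, fun h => h.elim id (fun he' => he' ▸ hyp)⟩
      · have he : PySem.Set.add s y = s ++ [y] := by simp [PySem.Set.add, hy]
        rw [he]
        simp [List.mem_append, hmem a]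
    have hp' : (PySem.Set.add s y).Pairwise (fun a b => xs.idxOf a < xs.idxOf b) := by
      by_cases hy : y ∈ s
      · simpa [PySem.Set.add, PySem.Set.contains, hy] using hp
      · have hys : PySem.Set.add s y = s ++ [y] := by
          simp [PySem.Set.add, PySem.Set.contains, hy]
        rw [hys, List.pairwise_append]
        refine ⟨hp, List.pairwise_singleton _ _, ?_⟩
        intro a ha b hb
        rw [List.mem_singleton.mp hb]
        have hap : a ∈ p := (hmem a).mp ha
        have hyp : y ∉ p := fun hc => hy ((hmem y).mpr hc)
        have h1 : xs.idxOf a < p.length := by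
          rw [hxs, List.idxOf_append_of_mem hap]
          exact List.idxOf_lt_length_of_mem hap
        have h2 : p.length ≤ xs.idxOf y := by
          rw [hxs, List.idxOf_append_of_notMem hyp]
          exact Nat.le_add_right _ _
        omega
    simpa using ih (p ++ [y]) (PySem.Set.add s y) hxs' hmem' hp'

-- the distinct elements of xs, in Set.ofList's first-occurrence order,
-- have strictly increasing first-occurrence indices
theorem pvOfList_pairwise_idx {α : Type} [DecidableEq α] (xs : List α) :
    (PySem.Set.ofList xs).Pairwise (fun a b => xs.idxOf a < xs.idxOf b) := by
  rw [PySem.Set.ofList_eq_foldl]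
  exact pvFoldAdd_invariant xs xs [] [] (by simp) (by simp) (List.Pairwise.nil)

-- sorting set(xs) by first index is PySem's ordered dedup
theorem pvIndex_getD_eq_idxOf (xs : List String) (a : String) (h : a ∈ xs) :
    (PySem.List.index? xs a).getD 0 = xs.idxOf a := by
  obtain ⟨k, hk⟩ := Option.isSome_iff_exists.mp (List.isSome_idxOf?.mpr h)
  rw [PySem.List.index?_eq_idxOf?, List.idxOf_eq_getD_idxOf?, hk]; rfl

-- sorting set(xs) by first-occurrence index leaves the first-occurrence order unchanged
theorem pvSorted_ofList_by_idx (xs : List String) :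
    PySem.List.sorted (PySem.Set.ofList xs) (fun s => (PySem.List.index? xs s).getD 0) false
      = PySem.Set.ofList xs := by
  apply PySem.List.sorted_eq_of_perm_of_pairwise_lt _ _ _ (List.Perm.refl _)
  refine List.Pairwise.imp_of_mem ?_ (pvOfList_pairwise_idx xs)
  intro a b ha hb hlt
  rw [pvIndex_getD_eq_idxOf xs a ((PySem.Set.mem_ofList _ _).mp ha),
      pvIndex_getD_eq_idxOf xs b ((PySem.Set.mem_ofList _ _).mp hb)]
  exact hlt

-- ===== VERDICT =====
theorem pvFinish_some (E : List String) :
    pvFinish (some E)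
      = PySem.List.sorted (PySem.Set.ofList E) (fun s => (PySem.List.index? E s).getD 0) false := rfl

theorem parse_download_scopes_py_spec : Claim_equal_parse_download_scopes_py := by
  intro raw_value _ hpre
  unfold Spec_parse_download_scopes_py parse_download_scopes_py parse_download_scopes_py_alt
  set normalized := PySem.Str.strip (raw_value.getD "") with hn
  by_cases hempty : normalized = ""
  · simp [hempty]
  · simp only [if_neg hempty, pvTokens]
    have hval : ∀ t ∈ ((PySem.Str.split? normalized ",").getD []).filter
        (fun p => PySem.Str.strip p ≠ ""), (pvAliases.get? (pvNormalize t)).isSome := hpre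
    have hA : PySem.Set.empty = ([] : List String) := rfl
    rw [hA, pvLoopA_valid _ _ _ hval, pvExpandParts_valid pvAliases _ hval, pvFinish_some,
      pvSorted_ofList_by_idx, PySem.Set.update_nil_left]
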